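-- pv_equiv track=rewrite | github.com/olga-bessonova/blind75 | frequent_letters/frequent_letters3.py | frequent_letters
-- ===== SOURCE A (Python) =====
-- def frequent_letters(string):
--   hash = {}
--   for i, ch in enumerate(string):
--     if ch in hash:
--       hash[ch] += 1
--     else:
--       hash[ch] = 1
--   return [x for x in hash if hash[x] > 2]
-- ===== SOURCE B (Python) =====
-- def frequent_letters(string):
--   seen = set()
--   result = []
--   for ch in string:
--     if ch not in seen:
--       seen.add(ch)
--       if string.count(ch) > 2:
--         result.append(ch)
--   return result
-- ===== Notes on version B (the rewrite author's own statement) =====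
-- stated objective: alternative
-- what changed: Replaces the frequency-dict building pass plus final key comprehension by a single loop with a seen-set that, at each first occurrence of a character, decides inclusion by a nested str.count scan of the whole string.
import Mathlib
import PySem

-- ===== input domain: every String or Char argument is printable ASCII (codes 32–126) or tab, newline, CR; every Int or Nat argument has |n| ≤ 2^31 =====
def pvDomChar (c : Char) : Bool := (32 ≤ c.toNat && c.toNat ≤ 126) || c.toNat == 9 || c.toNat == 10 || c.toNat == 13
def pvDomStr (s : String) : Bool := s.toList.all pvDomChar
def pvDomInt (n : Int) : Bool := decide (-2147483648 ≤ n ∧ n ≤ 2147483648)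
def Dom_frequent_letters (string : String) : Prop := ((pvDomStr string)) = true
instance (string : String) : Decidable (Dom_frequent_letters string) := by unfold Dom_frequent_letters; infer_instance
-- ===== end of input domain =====

-- B replaces A's frequency-dict pass + final comprehension by a seen-set loop that tests each
-- first-seen character with a nested string.count scan (alternative algorithm; same results).

-- ===== PORT A =====
def frequent_letters (string : String) : List String :=
  let h := string.toList.foldl
    (fun (h : PySem.Dict Char Int) ch =>
      if h.contains ch then h.insert ch (h.getD ch 0 + 1) else h.insert ch 1)
    PySem.Dict.empty
  (h.keys.filter (fun x => decide (h.getD x 0 > 2))).map (fun c => String.ofList [c])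

-- ===== PORT B =====
def frequent_letters_alt (string : String) : List String :=
  (string.toList.foldl
    (fun (st : PySem.Set Char × List String) ch =>
      if st.1.contains ch then st
      else (PySem.Set.add st.1 ch,
            if PySem.Str.count string (String.ofList [ch]) > 2
            then st.2 ++ [String.ofList [ch]] else st.2))
    (PySem.Set.empty, [])).2

-- ===== PRECONDITION & SPEC =====
def Spec_frequent_letters (string : String) (out : List String) : Prop := out = frequent_letters_alt string
instance (string : String) (out : List String) : Decidable (Spec_frequent_letters string out) := by unfold Spec_frequent_letters; infer_instance

-- ===== CLAIM (what is proved, stated in full; the proofs are below) =====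
def Claim_equal_frequent_letters : Prop := ∀ (string : String), Dom_frequent_letters string → Spec_frequent_letters string (frequent_letters string)

-- ===== LEMMAS AND PROOFS =====

-- Python's str.count of a single-character needle is the character count.
theorem chars_count_go_single (c : Char) :
    ∀ (l : List Char) (fuel acc : Nat), l.length ≤ fuel →
      PySem.Chars.count.go [c] fuel l acc = acc + l.count c := by
  intro l
  induction l with
  | nil =>
      intro fuel acc _
      cases fuel <;> simp [PySem.Chars.count.go]
  | cons h t ih =>
      intro fuel acc hle
      cases fuel with
      | zero => simp at hle
      | succ n =>
          by_cases hc : c = h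
          · subst hc
            simp only [PySem.Chars.count.go, List.isPrefixOf, beq_self_eq_true, Bool.true_and,
              List.length_cons, List.length_nil, List.drop_succ_cons, List.drop_zero,
              List.count_cons, if_true]
            rw [ih n (acc + 1) (by simpa using hle)]
            omega
          · have hb : (c == h) = false := by simp [hc]
            simp only [PySem.Chars.count.go, List.isPrefixOf, hb, Bool.false_and,
              if_neg Bool.false_ne_true, List.count_cons]
            rw [ih n acc (by simpa using hle)]
            simp [beq_iff_eq, Ne.symm hc]

theorem chars_count_single (s : List Char) (c : Char) :
    PySem.Chars.count s [c] = s.count c := by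
  simp [PySem.Chars.count, chars_count_go_single c s s.length 0 le_rfl]

-- first-occurrence list of chars of cs that are not yet in s, in order
def freshChars (s : PySem.Set Char) : List Char → List Char
  | [] => []
  | c :: t => if s.contains c then freshChars s t else c :: freshChars (PySem.Set.add s c) t

theorem update_eq_append_fresh (cs : List Char) :
    ∀ (s : PySem.Set Char), PySem.Set.update s cs = s ++ freshChars s cs := by
  induction cs with
  | nil => intro s; simp [PySem.Set.update, freshChars]
  | cons c t ih =>
      intro s
      simp only [PySem.Set.update, List.foldl_cons, freshChars]
      by_cases hc : s.contains c
      · have h1 : PySem.Set.add s c = s := by simp [PySem.Set.add]; simpa using hc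
        have h2 := ih s
        simp only [PySem.Set.update] at h2
        rw [h1, h2, if_pos hc]
      · have h1 : PySem.Set.add s c = s ++ [c] := by simp [PySem.Set.add]; simpa using hc
        have h2 := ih (PySem.Set.add s c)
        simp only [PySem.Set.update] at h2
        rw [h2, if_neg hc, h1]
        simp

theorem freshChars_empty (cs : List Char) :
    freshChars PySem.Set.empty cs = PySem.Set.ofList cs := by
  have h := update_eq_append_fresh cs PySem.Set.empty
  simpa [PySem.Set.ofList_eq_foldl, PySem.Set.update, PySem.Set.empty] using h.symm

-- B's loop appends exactly the fresh chars that pass the test P.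
theorem b_loop (P : Char → Prop) [DecidablePred P] (cs : List Char) :
    ∀ (s : PySem.Set Char) (r : List String),
      cs.foldl
        (fun (st : PySem.Set Char × List String) ch =>
          if st.1.contains ch then st
          else (PySem.Set.add st.1 ch,
                if P ch then st.2 ++ [String.ofList [ch]] else st.2))
        (s, r)
      = (PySem.Set.update s cs,
         r ++ ((freshChars s cs).filter (fun c => decide (P c))).map (fun c => String.ofList [c])) := by
  induction cs with
  | nil => intro s r; simp [PySem.Set.update, freshChars]
  | cons c t ih =>
      intro s r
      simp only [List.foldl_cons]
      by_cases hc : s.contains c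
      · rw [if_pos hc, ih s r]
        have h1 : PySem.Set.add s c = s := by simp [PySem.Set.add]; simpa using hc
        simp only [freshChars, if_pos hc, PySem.Set.update, List.foldl_cons, h1]
      · rw [if_neg hc, ih (PySem.Set.add s c)]
        simp only [freshChars, if_neg hc, List.filter_cons]
        by_cases hp : P c
        · simp [hp, PySem.Set.update]
        · simp [hp, PySem.Set.update]

-- A's loop body equals the standard counter step.
theorem a_loop_eq_counter (cs : List Char) :
    cs.foldl
      (fun (h : PySem.Dict Char Int) ch =>
        if h.contains ch then h.insert ch (h.getD ch 0 + 1) else h.insert ch 1)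
      PySem.Dict.empty = PySem.Dict.counter cs := by
  rw [PySem.List.foldl_congr_mem _ _ (fun d x => d.insert x (d.getD x 0 + 1)) _
      (by
        intro d x _
        by_cases hx : d.contains x
        · simp [hx]
        · simp only [hx, if_neg Bool.false_ne_true]
          rw [PySem.Dict.getD_of_not_contains d 0 (by simpa using hx)]
          norm_num)]
  exact PySem.Dict.foldl_insert_getD_add_one_eq_counter cs

-- ===== VERDICT (by name: the statement is the Claim_ definition above) =====
theorem frequent_letters_spec : Claim_equal_frequent_letters := by
  intro string _
  unfold Spec_frequent_letters frequent_letters frequent_letters_alt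
  rw [a_loop_eq_counter]
  rw [b_loop (fun ch => PySem.Str.count string (String.ofList [ch]) > 2) string.toList
      PySem.Set.empty []]
  simp only [freshChars_empty, PySem.Dict.keys_counter, List.nil_append]
  congr 1
  apply List.filter_congr
  intro c _
  rw [PySem.Dict.getD_counter]
  have : PySem.Str.count string (String.ofList [c]) = string.toList.count c := by
    simp [chars_count_single]
  simp only [this]
  rw [decide_eq_decide]
  omega
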